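-- pv_equiv track=rewrite | github.com/jpgil/logdelay | src/theory202104.py | pairs_in_trace
-- ===== SOURCE A (Python) =====
-- def pair_cardinality(x, y, T):
--     '''
--     Returns the cardinality if (x,y) is pair in T, otherwise it returns -1
--
--     This function is also called strong-cardinality
--     '''
--     if x==y:
--         return -1
--     intersection=[a for a in T if a==x or a==y ]
--     cardinality=int(len(intersection) / 2)
--     return cardinality if [x,y]*cardinality==intersection else -1
--
-- def pairs_in_trace(T, cardinality=pair_cardinality):
--     '''
--     Extract the cardinality of each pair in T
--
--     By default cardinality=pair_cardinality , the strong cardinality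
--
--     Returns a dict[(a,b)] = cardinality(a,b,T)
--     '''
--     Pairs_in_T = {}
--
--     # The alphabet in T
--     Sigma_T = list( set( [x for x in T] ) )
--     for i in range( len(Sigma_T) ):
--         a = Sigma_T[i]
--
--         Pairs_in_T[ (a,a) ] = cardinality(a, a, T)
--         for b in Sigma_T[i+1:]:
--             Pairs_in_T[ (a,b) ] = cardinality(a, b, T)
--             # asymmetric paired property: if (a,b) is paired in T the (b,a) is not
--             if Pairs_in_T[ (a,b) ]>=0:
--                 Pairs_in_T[ (b,a) ] = -1
--             else:
--                 Pairs_in_T[ (b,a) ] = cardinality(b, a, T)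
--     return Pairs_in_T
-- ===== SOURCE B (Python) =====
-- def pairs_in_trace(T, cardinality=None):
--     """Same result as the original: precompute each symbol's occurrence positions
--     once, then decide each pair's strong-cardinality by zipping the two position
--     lists (alternation check) instead of filtering the whole trace per pair."""
--     sigma = list(dict.fromkeys(T))
--     pos = {}
--     for i, t in enumerate(T):
--         pos.setdefault(t, []).append(i)
--
--     def strong(x, y):
--         if x == y:
--             return -1
--         px = pos.get(x, [])
--         py = pos.get(y, [])
--         if len(px) != len(py):
--             return -1
--         if all(p < q for p, q in zip(px, py)) and all(q < p for q, p in zip(py, px[1:])):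
--             return len(px)
--         return -1
--
--     card = strong if cardinality is None else (lambda x, y: cardinality(x, y, T))
--     res = {}
--     for i, a in enumerate(sigma):
--         res[(a, a)] = card(a, a)
--         for b in sigma[i + 1:]:
--             c = card(a, b)
--             res[(a, b)] = c
--             res[(b, a)] = -1 if c >= 0 else card(b, a)
--     return res
-- ===== Notes on version B (the rewrite author's own statement) =====
-- stated objective: faster
-- what changed: Instead of filtering the whole trace and comparing it to a replicated [x,y] pattern for every symbol pair, B builds each symbol's occurrence-position list in one pass and decides a pair's strong-cardinality by zipping the two position lists (alternation check).
import Mathlib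
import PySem

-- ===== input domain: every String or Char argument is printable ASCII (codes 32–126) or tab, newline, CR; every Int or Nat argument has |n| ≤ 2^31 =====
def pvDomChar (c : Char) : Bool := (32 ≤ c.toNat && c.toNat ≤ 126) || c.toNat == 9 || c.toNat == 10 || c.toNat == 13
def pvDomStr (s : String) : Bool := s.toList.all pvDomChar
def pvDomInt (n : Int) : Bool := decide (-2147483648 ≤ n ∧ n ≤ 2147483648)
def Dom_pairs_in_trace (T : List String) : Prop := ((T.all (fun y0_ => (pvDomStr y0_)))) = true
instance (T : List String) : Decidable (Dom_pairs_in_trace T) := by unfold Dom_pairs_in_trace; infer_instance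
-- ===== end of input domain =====

-- B precomputes per-symbol occurrence positions once and decides each pair by a zip
-- alternation check instead of filtering the whole trace per pair; return value only.
-- Python's set iteration order is not modelled: Sigma_T is ported in first-occurrence
-- order; the dict outputs are compared ignoring entry order, and each entry's value is
-- independent of that order.

-- ===== PORT A =====
def pair_cardinality (x y : String) (T : List String) : Int :=
  if x == y then -1
  else
    let intersection := T.filter (fun a => a == x || a == y)
    let cardinality := intersection.length / 2
    if (List.replicate cardinality [x, y]).flatten == intersection then (cardinality : Int)
    else -1

def pairs_in_trace (T : List String) : List (String × String × Int) :=
  let Sigma_T : List String := PySem.Set.ofList T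
  let P := (PySem.List.pyRange 0 (Sigma_T.length : Int) 1).foldl (fun d i =>
    match PySem.List.pyGet? Sigma_T i with
    | none => d
    | some a =>
      let d := d.insert (a, a) (pair_cardinality a a T)
      (PySem.List.slice Sigma_T (some (i + 1)) none).foldl (fun d b =>
        let d := d.insert (a, b) (pair_cardinality a b T)
        match d.get? (a, b) with
        | none => d
        | some v =>
          if v ≥ 0 then d.insert (b, a) (-1)
          else d.insert (b, a) (pair_cardinality b a T)) d)
    (PySem.Dict.empty : PySem.Dict (String × String) Int)
  P.items.map (fun p => (p.1.1, p.1.2, p.2))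

-- ===== PORT B =====
def pvBuildPos (T : List String) : PySem.Dict String (List Int) :=
  (PySem.List.enumerate T 0).foldl
    (fun d p => d.modify p.2 [] (fun l => l ++ [p.1])) PySem.Dict.empty

def pvStrong (pos : PySem.Dict String (List Int)) (x y : String) : Int :=
  if x == y then -1
  else
    let px := pos.getD x []
    let py := pos.getD y []
    if px.length != py.length then -1
    else if (px.zip py).all (fun pq => decide (pq.1 < pq.2)) &&
            (py.zip (PySem.List.slice px (some 1) none)).all (fun qp => decide (qp.1 < qp.2)) then
      (px.length : Int)
    else -1

def pairs_in_trace_alt (T : List String) : List (String × String × Int) :=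
  let sigma := PySem.List.dedup T
  let pos := pvBuildPos T
  let res := (PySem.List.enumerate sigma 0).foldl (fun d pa =>
    let a := pa.2
    let d := d.insert (a, a) (pvStrong pos a a)
    (PySem.List.slice sigma (some (pa.1 + 1)) none).foldl (fun d b =>
      let c := pvStrong pos a b
      let d := d.insert (a, b) c
      if c ≥ 0 then d.insert (b, a) (-1)
      else d.insert (b, a) (pvStrong pos b a)) d)
    (PySem.Dict.empty : PySem.Dict (String × String) Int)
  res.items.map (fun p => (p.1.1, p.1.2, p.2))

-- ===== PRECONDITION & SPEC =====
def Spec_pairs_in_trace (T : List String) (out : List (String × String × Int)) : Prop := out = pairs_in_trace_alt T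
instance (T : List String) (out : List (String × String × Int)) : Decidable (Spec_pairs_in_trace T out) := by unfold Spec_pairs_in_trace; infer_instance

-- ===== CLAIM (what is proved, stated in full; the proofs are below) =====
def Claim_equal_pairs_in_trace : Prop := ∀ (T : List String), Dom_pairs_in_trace T → Spec_pairs_in_trace T (pairs_in_trace T)

-- ===== LEMMAS AND PROOFS =====

-- positions (as in enumerate) of x in T, starting index k
def posK (x : String) (T : List String) (k : Int) : List Int :=
  ((PySem.List.enumerate T k).filter (fun p => p.2 == x)).map (·.1)

lemma posK_nil (x : String) (k : Int) : posK x [] k = [] := by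
  simp [posK, PySem.List.enumerate_nil]

lemma posK_cons (x t : String) (ts : List String) (k : Int) :
    posK x (t :: ts) k = (if t == x then [k] else []) ++ posK x ts (k + 1) := by
  simp only [posK, PySem.List.enumerate_cons, List.filter_cons]
  by_cases h : t = x <;> simp [h]

lemma posK_cons_self (x t : String) (ts : List String) (k : Int) (h : (t == x) = true) :
    posK x (t :: ts) k = k :: posK x ts (k + 1) := by
  rw [posK_cons]; simp [h]

lemma posK_cons_ne (x t : String) (ts : List String) (k : Int) (h : (t == x) = false) :
    posK x (t :: ts) k = posK x ts (k + 1) := by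
  rw [posK_cons]; simp [h]

lemma posK_ge (x : String) (T : List String) : ∀ (k i : Int), i ∈ posK x T k → k ≤ i := by
  induction T with
  | nil => intro k i h; simp [posK_nil] at h
  | cons t ts ih =>
    intro k i h
    rw [posK_cons] at h
    rcases List.mem_append.1 h with h1 | h2
    · by_cases ht : t == x <;> simp [ht] at h1; omega
    · have := ih (k + 1) i h2; omega

lemma posK_lt (x : String) (T : List String) (k i : Int) (h : i ∈ posK x T (k + 1)) : k < i := by
  have := posK_ge x T (k + 1) i h; omega

lemma getD_foldl_modify_snd_append {l : List (Int × String)} (d : PySem.Dict String (List Int)) (c : String) :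
    (l.foldl (fun d p => d.modify p.2 [] (fun v => v ++ [p.1])) d).getD c []
      = d.getD c [] ++ (l.filter (fun p => p.2 == c)).map (·.1) := by
  induction l generalizing d with
  | nil => simp
  | cons p ps ih =>
    simp only [List.foldl_cons, List.filter_cons]
    rw [ih]
    by_cases h : p.2 = c
    · subst h; rw [PySem.Dict.getD_modify_self]; simp
    · rw [PySem.Dict.getD_modify_of_ne _ _ _ (fun hc => h hc.symm)]
      simp [beq_iff_eq, h]

lemma buildPos_getD (T : List String) (x : String) :
    (pvBuildPos T).getD x [] = posK x T 0 := by
  rw [pvBuildPos, getD_foldl_modify_snd_append]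
  simp [posK]

-- alternation automaton: expecting x (true) or y (false)
def inAlt (x y : String) : Bool → List String → Bool
  | e, [] => e
  | true, a :: r => a == x && inAlt x y false r
  | false, a :: r => a == y && inAlt x y true r

def zall (u v : List Int) : Bool := (u.zip v).all (fun pq => decide (pq.1 < pq.2))

lemma zall_nil_right (u : List Int) : zall u [] = true := by simp [zall]

lemma zall_nil_left (v : List Int) : zall [] v = true := by simp [zall]

lemma zall_cons_cons (a b : Int) (u v : List Int) :
    zall (a :: u) (b :: v) = (decide (a < b) && zall u v) := by simp [zall]

-- B's per-pair checks: C1 = balanced alternation starting x, C2 = one extra y, y first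
def C1 (px py : List Int) : Bool := px.length == py.length && zall px py && zall py px.tail
def C2 (px py : List Int) : Bool := py.length == px.length + 1 && zall py px && zall px py.tail

lemma C1_cons (k : Int) (px py : List Int) (hq : ∀ q ∈ py, k < q) :
    C1 (k :: px) py = C2 px py := by
  cases py with
  | nil =>
    rw [Bool.eq_iff_iff]
    simp [C1, C2, zall_nil_right]
  | cons q qs =>
    have hkq : k < q := hq q (by simp)
    rw [Bool.eq_iff_iff]
    simp only [C1, C2, List.length_cons, zall_cons_cons, List.tail_cons,
      Bool.and_eq_true, beq_iff_eq, decide_eq_true_eq]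
    constructor
    · rintro ⟨⟨hl, _, hz⟩, hz'⟩; exact ⟨⟨by omega, hz'⟩, hz⟩
    · rintro ⟨⟨hl, hz'⟩, hz⟩; exact ⟨⟨by omega, hkq, hz⟩, hz'⟩

lemma C2_cons (k : Int) (px py : List Int) (hq : ∀ q ∈ py, k < q) :
    C2 (k :: px) py = false := by
  cases py with
  | nil =>
    rw [Bool.eq_iff_iff]
    simp [C2]
  | cons q qs =>
    have hkq : k < q := hq q (by simp)
    rw [Bool.eq_iff_iff]
    simp only [C2, List.length_cons, zall_cons_cons, Bool.and_eq_true, decide_eq_true_eq]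
    constructor
    · rintro ⟨⟨_, hqk, _⟩, _⟩; omega
    · intro h; exact absurd h (by simp)

lemma C1_cons_right (k : Int) (px py : List Int) (hp : ∀ p ∈ px, k < p) :
    C1 px (k :: py) = false := by
  cases px with
  | nil =>
    rw [Bool.eq_iff_iff]
    simp [C1]
  | cons p ps =>
    have hkp : k < p := hp p (by simp)
    rw [Bool.eq_iff_iff]
    simp only [C1, List.length_cons, zall_cons_cons, Bool.and_eq_true, decide_eq_true_eq]
    constructor
    · rintro ⟨⟨_, hpk, _⟩, _⟩; omega
    · intro h; exact absurd h (by simp)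

lemma C2_cons_right (k : Int) (px py : List Int) (hp : ∀ p ∈ px, k < p) :
    C2 px (k :: py) = C1 px py := by
  cases px with
  | nil =>
    rw [Bool.eq_iff_iff]
    simp only [C2, C1, List.length_nil, List.length_cons, List.tail_cons, List.tail_nil,
      zall_nil_left, zall_nil_right, Bool.and_eq_true, beq_iff_eq, and_true]
    omega
  | cons p ps =>
    have hkp : k < p := hp p (by simp)
    rw [Bool.eq_iff_iff]
    simp only [C2, C1, List.length_cons, zall_cons_cons, List.tail_cons,
      Bool.and_eq_true, beq_iff_eq, decide_eq_true_eq]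
    constructor
    · rintro ⟨⟨hl, _, hz⟩, hz'⟩; exact ⟨⟨by omega, hz'⟩, hz⟩
    · rintro ⟨⟨hl, hz'⟩, hz⟩; exact ⟨⟨by omega, hkp, hz⟩, hz'⟩

-- the central simulation: zip checks on position lists = alternation of the filtered trace
lemma C1C2_eq_inAlt (x y : String) (hxy : x ≠ y) : ∀ (T : List String) (k : Int),
    (C1 (posK x T k) (posK y T k) = inAlt x y true (T.filter (fun a => a == x || a == y))) ∧
    (C2 (posK x T k) (posK y T k) = inAlt x y false (T.filter (fun a => a == x || a == y))) := by
  intro T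
  induction T with
  | nil => intro k; simp [posK_nil, C1, C2, zall, inAlt]
  | cons t ts ih =>
    intro k
    by_cases htx : t = x
    · have hbx : (t == x) = true := by simp [htx]
      have hby : (t == y) = false := by simp; rw [htx]; exact hxy
      have hfil : (t :: ts).filter (fun a => a == x || a == y)
          = t :: ts.filter (fun a => a == x || a == y) := by
        rw [List.filter_cons]; simp [hbx]
      rw [posK_cons_self x t ts k hbx, posK_cons_ne y t ts k hby, hfil]
      constructor
      · rw [C1_cons _ _ _ (posK_lt y ts k)]
        have hstep : inAlt x y true (t :: ts.filter (fun a => a == x || a == y))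
            = inAlt x y false (ts.filter (fun a => a == x || a == y)) := by
          simp [inAlt, hbx]
        rw [hstep]
        exact (ih (k + 1)).2
      · rw [C2_cons _ _ _ (posK_lt y ts k)]
        have hstep : inAlt x y false (t :: ts.filter (fun a => a == x || a == y)) = false := by
          simp [inAlt, hby]
        rw [hstep]
    · by_cases hty : t = y
      · have hbx : (t == x) = false := by simp; exact htx
        have hby : (t == y) = true := by simp [hty]
        have hfil : (t :: ts).filter (fun a => a == x || a == y)
            = t :: ts.filter (fun a => a == x || a == y) := by
          rw [List.filter_cons]; simp [hby]
        rw [posK_cons_ne x t ts k hbx, posK_cons_self y t ts k hby, hfil]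
        constructor
        · rw [C1_cons_right _ _ _ (posK_lt x ts k)]
          have hstep : inAlt x y true (t :: ts.filter (fun a => a == x || a == y)) = false := by
            simp [inAlt, hbx]
          rw [hstep]
        · rw [C2_cons_right _ _ _ (posK_lt x ts k)]
          have hstep : inAlt x y false (t :: ts.filter (fun a => a == x || a == y))
              = inAlt x y true (ts.filter (fun a => a == x || a == y)) := by
            simp [inAlt, hby]
          rw [hstep]
          exact (ih (k + 1)).1
      · have hbx : (t == x) = false := by simp; exact htx
        have hby : (t == y) = false := by simp; exact hty
        have hfil : (t :: ts).filter (fun a => a == x || a == y)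
            = ts.filter (fun a => a == x || a == y) := by
          rw [List.filter_cons]; simp [hbx, hby]
        rw [posK_cons_ne x t ts k hbx, posK_cons_ne y t ts k hby, hfil]
        exact ih (k + 1)

lemma posK_length_add (x y : String) (hxy : x ≠ y) : ∀ (T : List String) (k : Int),
    (posK x T k).length + (posK y T k).length
      = (T.filter (fun a => a == x || a == y)).length := by
  intro T
  induction T with
  | nil => intro k; simp [posK_nil]
  | cons t ts ih =>
    intro k
    by_cases htx : t = x
    · have hbx : (t == x) = true := by simp [htx]
      have hby : (t == y) = false := by simp; rw [htx]; exact hxy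
      rw [posK_cons_self x t ts k hbx, posK_cons_ne y t ts k hby, List.filter_cons]
      simp only [hbx, Bool.true_or, if_true, List.length_cons]
      rw [← ih (k + 1)]; omega
    · by_cases hty : t = y
      · have hbx : (t == x) = false := by simp; exact htx
        have hby : (t == y) = true := by simp [hty]
        rw [posK_cons_ne x t ts k hbx, posK_cons_self y t ts k hby, List.filter_cons]
        simp only [hby, Bool.or_true, if_true, List.length_cons]
        rw [← ih (k + 1)]; omega
      · have hbx : (t == x) = false := by simp; exact htx
        have hby : (t == y) = false := by simp; exact hty
        rw [posK_cons_ne x t ts k hbx, posK_cons_ne y t ts k hby, List.filter_cons]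
        simp only [hbx, hby, Bool.or_self]
        rw [if_neg (by simp)]
        exact ih (k + 1)

-- two-step recursor for the replicated-pattern lemma
def twoStep : List String → Bool
  | [] => true
  | [_] => true
  | _ :: _ :: r => twoStep r

-- A's replicated-pattern test is the alternation automaton
lemma replicate_eq_iff_inAlt (x y : String) (f : List String) :
    ((List.replicate (f.length / 2) [x, y]).flatten = f) ↔ inAlt x y true f = true := by
  induction f using twoStep.induct with
  | case1 => simp [inAlt]
  | case2 a => simp [inAlt]
  | case3 a b r ih =>
    have hlen : (a :: b :: r).length / 2 = r.length / 2 + 1 := by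
      simp only [List.length_cons]; omega
    rw [hlen, List.replicate_succ, List.flatten_cons]
    constructor
    · intro h
      have h1 : x = a ∧ y = b ∧ (List.replicate (r.length / 2) [x, y]).flatten = r := by
        simpa using h
      obtain ⟨hx, hy, hr⟩ := h1
      simp [inAlt, ← hx, ← hy, ih.1 hr]
    · intro h
      simp only [inAlt, Bool.and_eq_true, beq_iff_eq] at h
      obtain ⟨ha, hb, hr⟩ := h
      simp [ha, hb, ih.2 hr]

-- per-pair equivalence: A's cardinality = B's positions check
lemma card_eq_strong (T : List String) (x y : String) :
    pair_cardinality x y T = pvStrong (pvBuildPos T) x y := by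
  by_cases hxy : x = y
  · simp [pair_cardinality, pvStrong, hxy]
  · have hb : (x == y) = false := by simp; exact hxy
    rw [pair_cardinality, pvStrong]
    simp only [hb, Bool.false_eq_true, if_false]
    rw [buildPos_getD, buildPos_getD, PySem.List.slice_from_one]
    set px := posK x T 0 with hpx
    set py := posK y T 0 with hpy
    set f := T.filter (fun a => a == x || a == y) with hf
    have hC1 : C1 px py = inAlt x y true f := (C1C2_eq_inAlt x y hxy T 0).1
    have hlen : px.length + py.length = f.length := posK_length_add x y hxy T 0
    have hzall1 : (px.zip py).all (fun pq => decide (pq.1 < pq.2)) = zall px py := rfl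
    have hzall2 : (py.zip px.tail).all (fun qp => decide (qp.1 < qp.2)) = zall py px.tail := rfl
    rw [hzall1, hzall2]
    by_cases hl : px.length = py.length
    · have hne : (px.length != py.length) = false := by simp [hl]
      rw [hne]
      simp only [Bool.false_eq_true, if_false]
      by_cases hz : (zall px py && zall py px.tail) = true
      · have hc1 : C1 px py = true := by
          simp only [C1, hl, beq_self_eq_true, Bool.true_and]; exact hz
        have hin : inAlt x y true f = true := by rw [← hC1]; exact hc1
        have hrep : ((List.replicate (f.length / 2) [x, y]).flatten == f) = true := by
          simp [(replicate_eq_iff_inAlt x y f).2 hin]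
        rw [hrep, hz]
        simp only [if_true]
        have h2 : f.length / 2 = px.length := by omega
        simp [h2]
      · have hc1 : C1 px py = false := by
          simp only [C1, hl, beq_self_eq_true, Bool.true_and]
          exact Bool.eq_false_iff.2 (fun h => hz h)
        have hin : inAlt x y true f = false := by rw [← hC1]; exact hc1
        have hrep : ((List.replicate (f.length / 2) [x, y]).flatten == f) = false := by
          rw [Bool.eq_false_iff]
          intro h
          have h2 := (replicate_eq_iff_inAlt x y f).1 (by simpa using h)
          rw [hin] at h2
          simp at h2
        have hzf : (zall px py && zall py px.tail) = false := Bool.eq_false_iff.2 hz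
        rw [hrep, hzf]
        simp
    · have hne : (px.length != py.length) = true := by simp [hl]
      rw [hne]
      simp only [if_true]
      have hc1 : C1 px py = false := by
        have h0 : (px.length == py.length) = false := by simp [hl]
        simp [C1, h0]
      have hin : inAlt x y true f = false := by rw [← hC1]; exact hc1
      have hrep : ((List.replicate (f.length / 2) [x, y]).flatten == f) = false := by
        rw [Bool.eq_false_iff]
        intro h
        have h2 := (replicate_eq_iff_inAlt x y f).1 (by simpa using h)
        rw [hin] at h2
        simp at h2
      rw [hrep]
      simp

-- ===== VERDICT (by name: the statement is the Claim_ definition above) =====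
theorem pairs_in_trace_spec : Claim_equal_pairs_in_trace := by
  intro T _
  show pairs_in_trace T = pairs_in_trace_alt T
  simp only [pairs_in_trace, pairs_in_trace_alt, PySem.List.dedup_eq_ofList]
  congr 1
  congr 1
  rw [PySem.List.enumerate_eq_map_pyRange (PySem.Set.ofList T) "", List.foldl_map]
  simp only [PySem.List.len_eq]
  apply PySem.List.foldl_congr_mem
  intro acc i hi
  obtain ⟨h0, h1⟩ := PySem.List.mem_pyRange_one.mp hi
  rw [PySem.List.pyGet?_eq_some_getElem _ h0 h1, PySem.List.pyGetD_eq_getElem _ _ h0 h1]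
  simp only [card_eq_strong T, PySem.Dict.get?_insert_self]
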